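-- pv_equiv track=rewrite | github.com/riisatoro/dots | django-dots/api/game/core.py | pop_with_common_points
-- ===== SOURCE A (Python) =====
-- def pop_with_common_points(loops):
--     res = {}
--     for loop in loops:
--         key = (loop[1], loop[-1])
--         if key in res.keys():
--             res[key] = min([res[key], loop], key=len)
--         else:
--             res[key] = loop
--     return list(res.values())
-- ===== SOURCE B (Python) =====
-- def pop_with_common_points(loops):
--     groups = {}
--     for loop in loops:
--         groups.setdefault((loop[1], loop[-1]), []).append(loop)
--     return [min(g, key=len) for g in groups.values()]
-- ===== Notes on version B (the rewrite author's own statement) =====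
-- stated objective: simpler
-- what changed: Replaces A's incremental keep-the-shorter if/else update with a two-pass shape: one append-only grouping pass (setdefault), then min(g, key=len) per group; encounter order and min's first-element tie rule preserve A's exact output.
import Mathlib
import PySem

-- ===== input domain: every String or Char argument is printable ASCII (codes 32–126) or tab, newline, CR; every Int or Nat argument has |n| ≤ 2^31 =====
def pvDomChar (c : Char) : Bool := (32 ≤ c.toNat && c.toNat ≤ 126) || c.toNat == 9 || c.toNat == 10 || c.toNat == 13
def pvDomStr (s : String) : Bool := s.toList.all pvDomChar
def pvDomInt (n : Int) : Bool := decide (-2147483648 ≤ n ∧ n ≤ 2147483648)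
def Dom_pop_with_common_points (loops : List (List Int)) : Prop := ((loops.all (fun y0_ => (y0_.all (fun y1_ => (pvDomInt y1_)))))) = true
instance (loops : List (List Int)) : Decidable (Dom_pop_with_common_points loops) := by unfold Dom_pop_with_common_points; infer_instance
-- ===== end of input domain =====

-- B replaces A's incremental keep-the-shorter update with an append-only grouping pass
-- followed by a per-group min(key=len) pass; same output, chosen for simplicity.


-- ===== PORT A =====
def pop_with_common_points (loops : List (List Int)) : List (List Int) :=
  (loops.foldl
    (fun (res : PySem.Dict (Option Int × Option Int) (List Int)) loop =>
      let key := (PySem.List.pyGet? loop 1, PySem.List.pyGet? loop (-1))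
      if res.contains key then
        res.insert key (if (res.getD key []).length ≤ loop.length then res.getD key [] else loop)
      else
        res.insert key loop)
    PySem.Dict.empty).values

-- ===== PORT B =====
def pop_with_common_points_alt (loops : List (List Int)) : List (List Int) :=
  let groups := loops.foldl
    (fun (d : PySem.Dict (Option Int × Option Int) (List (List Int))) loop =>
      d.modify (PySem.List.pyGet? loop 1, PySem.List.pyGet? loop (-1)) [] (· ++ [loop]))
    PySem.Dict.empty
  groups.values.map (fun g => (PySem.List.min? g (fun l => l.length)).getD [])

-- ===== PRECONDITION & SPEC =====
-- Pre_ excludes exactly the inputs where Python A raises IndexError: a loop with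
-- fewer than 2 elements makes loop[1] (or loop[-1]) raise.
def Pre_pop_with_common_points (loops : List (List Int)) : Prop :=
  (loops.all (fun l => 2 ≤ l.length)) = true
instance (loops : List (List Int)) : Decidable (Pre_pop_with_common_points loops) := by
  unfold Pre_pop_with_common_points; infer_instance
def pvWitness_pop_with_common_points : List (List Int) := [[1, 2], [0, 1, 2], [5, 1, 7, 2]]

def Spec_pop_with_common_points (loops : List (List Int)) (out : List (List Int)) : Prop := out = pop_with_common_points_alt loops
instance (loops : List (List Int)) (out : List (List Int)) : Decidable (Spec_pop_with_common_points loops out) := by unfold Spec_pop_with_common_points; infer_instance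

-- ===== CLAIM (what is proved, stated in full; the proofs are below) =====
def Claim_equal_pop_with_common_points : Prop := ∀ (loops : List (List Int)), Dom_pop_with_common_points loops → Pre_pop_with_common_points loops → Spec_pop_with_common_points loops (pop_with_common_points loops)

-- ===== LEMMAS AND PROOFS =====

-- first element of minimal length in a group (B's per-group reduction)
def pvMfirst (g : List (List Int)) : List Int :=
  (PySem.List.min? g (fun l => l.length)).getD []

def pvF (p : (Option Int × Option Int) × List (List Int)) : (Option Int × Option Int) × List Int :=
  (p.1, pvMfirst p.2)

def pvStepA (res : PySem.Dict (Option Int × Option Int) (List Int)) (loop : List Int) :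
    PySem.Dict (Option Int × Option Int) (List Int) :=
  let key := (PySem.List.pyGet? loop 1, PySem.List.pyGet? loop (-1))
  if res.contains key then
    res.insert key (if (res.getD key []).length ≤ loop.length then res.getD key [] else loop)
  else
    res.insert key loop

def pvStepB (d : PySem.Dict (Option Int × Option Int) (List (List Int))) (loop : List Int) :
    PySem.Dict (Option Int × Option Int) (List (List Int)) :=
  d.modify (PySem.List.pyGet? loop 1, PySem.List.pyGet? loop (-1)) [] (· ++ [loop])

theorem pv_min?_append (g : List (List Int)) (x : List Int) :
    PySem.List.min? (g ++ [x]) (fun l => l.length) =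
      match PySem.List.min? g (fun l => l.length) with
      | none => some x
      | some m => if x.length < m.length then some x else some m := by
  unfold PySem.List.min?
  rw [List.foldl_append]
  generalize List.foldl _ none g = acc
  cases acc <;> rfl

theorem pv_mfirst_append (g : List (List Int)) (x : List Int) (hg : g ≠ []) :
    pvMfirst (g ++ [x]) =
      (if (pvMfirst g).length ≤ x.length then pvMfirst g else x) := by
  unfold pvMfirst
  rw [pv_min?_append]
  cases hm : PySem.List.min? g (fun l => l.length) with
  | none => exact absurd ((PySem.List.min?_eq_none_iff g (fun l => l.length)).mp hm) hg
  | some m =>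
    simp only [Option.getD_some]
    by_cases h : x.length < m.length
    · simp [h, Nat.not_le.mpr h]
    · simp [h, Nat.le_of_not_lt h]

theorem pv_get?_map (l : List ((Option Int × Option Int) × List (List Int)))
    (k : Option Int × Option Int) :
    (PySem.Dict.mk (l.map pvF)).get? k = ((PySem.Dict.mk l).get? k).map pvMfirst := by
  induction l with
  | nil => simp [PySem.Dict.get?]
  | cons p t ih =>
    simp only [List.map_cons]
    rw [show pvF p = (p.1, pvMfirst p.2) from rfl]
    rw [PySem.Dict.get?_mk_cons, PySem.Dict.get?_mk_cons]
    by_cases h : (p.1 == k) = true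
    · simp [h]
    · simp only [h, Bool.false_eq_true, if_false]; exact ih

theorem pv_contains_map (l : List ((Option Int × Option Int) × List (List Int)))
    (k : Option Int × Option Int) :
    (PySem.Dict.mk (l.map pvF)).contains k = (PySem.Dict.mk l).contains k := by
  rw [PySem.Dict.contains_eq_isSome_get?, PySem.Dict.contains_eq_isSome_get?, pv_get?_map]
  cases (PySem.Dict.mk l).get? k <;> rfl

-- invariant: A's state is B's state with every group reduced by pvMfirst, item by item
theorem pv_inv (loops : List (List Int)) :
    ∀ (dB : PySem.Dict (Option Int × Option Int) (List (List Int))),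
      (∀ p ∈ dB.items, p.2 ≠ []) →
      (loops.foldl pvStepA (PySem.Dict.mk (dB.items.map pvF))).items =
        ((loops.foldl pvStepB dB).items).map pvF := by
  induction loops with
  | nil => intro dB _; simp
  | cons loop t ih =>
    intro dB hne
    simp only [List.foldl_cons]
    have hstep : pvStepA (PySem.Dict.mk (dB.items.map pvF)) loop =
        PySem.Dict.mk (((pvStepB dB loop).items).map pvF) := by
      apply PySem.Dict.ext
      set k := ((PySem.List.pyGet? loop 1, PySem.List.pyGet? loop (-1)) : Option Int × Option Int) with hk
      have hcont : (PySem.Dict.mk (dB.items.map pvF)).contains k = dB.contains k := by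
        have := pv_contains_map dB.items k
        simpa using this
      by_cases hc : dB.contains k = true
      · -- key present: both sides overwrite in place
        obtain ⟨g, hg⟩ : ∃ g, dB.get? k = some g := by
          have := PySem.Dict.contains_eq_isSome_get? (d := dB) (k := k)
          rw [hc] at this
          cases h : dB.get? k with
          | none => rw [h] at this; simp at this
          | some g => exact ⟨g, rfl⟩
        have hgne : g ≠ [] := hne (k, g) (PySem.Dict.mem_items_of_get?_eq_some dB hg)
        have hgetA : (PySem.Dict.mk (dB.items.map pvF)).getD k [] = pvMfirst g := by
          rw [PySem.Dict.getD_eq_get?_getD]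
          have := pv_get?_map dB.items k
          simp only [show PySem.Dict.mk dB.items = dB from rfl] at this
          rw [this, hg]; rfl
        have hgetB : dB.getD k [] = g := by
          rw [PySem.Dict.getD_eq_get?_getD, hg]; rfl
        unfold pvStepA pvStepB PySem.Dict.modify
        simp only [← hk, hcont, hc, if_pos]
        rw [PySem.Dict.items_insert_of_contains _ _ (by rw [hcont]; exact hc),
            PySem.Dict.items_insert_of_contains _ _ hc]
        simp only [List.map_map]
        apply List.map_congr_left
        intro p hp
        by_cases hpk : (p.1 == k) = true
        · simp only [Function.comp, hpk, if_pos, pvF]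
          rw [hgetA, hgetB, pv_mfirst_append g loop hgne]
        · simp only [Function.comp, pvF, hpk, Bool.false_eq_true, if_false]
      · -- fresh key: both sides append
        have hc' : dB.contains k = false := by simpa using hc
        unfold pvStepA pvStepB PySem.Dict.modify
        simp only [← hk, hcont, hc', Bool.false_eq_true, if_false]
        rw [PySem.Dict.items_insert_of_not_contains _ _ (by rw [hcont]; exact hc'),
            PySem.Dict.items_insert_of_not_contains _ _ hc']
        have : dB.getD k [] = [] := PySem.Dict.getD_of_not_contains dB [] hc'
        rw [this]
        simp [pvF, pvMfirst, PySem.List.min?]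
    rw [hstep]
    apply ih
    intro p hp
    unfold pvStepB PySem.Dict.modify at hp
    rcases (PySem.Dict.mem_items_insert _ _ _ _).mp hp with h | h
    · subst h; simp
    · exact hne p h.1

-- ===== VERDICT (by name: the statement is the Claim_ definition above) =====
theorem pop_with_common_points_spec : Claim_equal_pop_with_common_points := by
  intro loops _ _
  unfold Spec_pop_with_common_points pop_with_common_points pop_with_common_points_alt
  have h := pv_inv loops PySem.Dict.empty (by intro p hp; simp [PySem.Dict.empty] at hp)
  have hempty : (PySem.Dict.mk (((PySem.Dict.empty : PySem.Dict (Option Int × Option Int) (List (List Int))).items).map pvF)) = (PySem.Dict.empty : PySem.Dict (Option Int × Option Int) (List Int)) := by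
    rfl
  rw [hempty] at h
  have hA : (loops.foldl pvStepA PySem.Dict.empty).items =
      ((loops.foldl pvStepB PySem.Dict.empty).items).map pvF := h
  show (loops.foldl pvStepA PySem.Dict.empty).values = _
  simp only [PySem.Dict.values, hA, List.map_map]
  rfl
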